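-- pv_equiv track=rewrite | github.com/shadow4424/Automated-Marking-System-for-Web-Development-Coursework | ams/analytics/batch_analytics.py | _primary_reason
-- ===== SOURCE A (Python) =====
-- from typing import Dict, List, Mapping, Sequence
--
-- def _primary_reason(rec: Mapping[str, object]) -> str:
--     findings = rec.get("findings", []) or []
--     priorities: Sequence[tuple[str, str]] = [
--         ("missing", "missing required files"),
--         ("BEHAVIOUR.", "behavioural runtime issue"),
--         ("SYNTAX", "syntax issue"),
--         ("BROWSER.", "browser runtime issue"),
--         ("CONSISTENCY.", "consistency issue"),
--     ]
--     for prefix, label in priorities: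
--         for f in findings:
--             if f.get("finding_category") == "missing" and prefix == "missing":
--                 return label
--             if prefix in f.get("id", ""):
--                 return label
--     return "other"
-- ===== SOURCE B (Python) =====
-- def _primary_reason(rec):
--     findings = rec.get("findings", []) or []
--     priorities = [
--         ("missing", "missing required files"),
--         ("BEHAVIOUR.", "behavioural runtime issue"),
--         ("SYNTAX", "syntax issue"),
--         ("BROWSER.", "browser runtime issue"),
--         ("CONSISTENCY.", "consistency issue"),
--     ]
--     best = None
--     for f in findings:
--         cat_missing = f.get("finding_category") == "missing"
--         fid = f.get("id", "")
--         for i, (prefix, _label) in enumerate(priorities):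
--             if (cat_missing and prefix == "missing") or (prefix in fid):
--                 if best is None or i < best:
--                     best = i
--                 break
--     return priorities[best][1] if best is not None else "other"
-- ===== Notes on version B (the rewrite author's own statement) =====
-- stated objective: alternative
-- what changed: A scans priority-major with nested loops and returns on the first hit; B makes a single pass over the findings, computing each finding's first matching priority index and keeping a running minimum, then indexes the priority table once at the end.
import Mathlib
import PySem

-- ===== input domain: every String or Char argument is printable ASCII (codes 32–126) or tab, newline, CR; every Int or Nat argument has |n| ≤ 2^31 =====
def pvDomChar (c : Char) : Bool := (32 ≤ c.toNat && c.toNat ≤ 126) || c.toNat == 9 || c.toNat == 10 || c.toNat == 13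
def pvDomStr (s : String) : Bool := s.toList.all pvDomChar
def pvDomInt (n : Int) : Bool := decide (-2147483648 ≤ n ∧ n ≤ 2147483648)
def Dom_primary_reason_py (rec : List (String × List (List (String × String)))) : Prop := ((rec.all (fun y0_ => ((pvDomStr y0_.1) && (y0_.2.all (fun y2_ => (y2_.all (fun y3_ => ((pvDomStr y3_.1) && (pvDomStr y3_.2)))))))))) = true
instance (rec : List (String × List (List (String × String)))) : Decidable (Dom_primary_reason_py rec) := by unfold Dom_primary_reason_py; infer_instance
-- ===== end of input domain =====

-- B replaces A's priority-major nested scan (return on first hit) with a single pass over the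
-- findings that keeps the minimum matching priority rank per finding (objective: alternative
-- decomposition; same result, proved below). Return value only; neither version mutates input.

-- the fixed priority table both versions carry
def pvPriorities : List (String × String) :=
  [("missing", "missing required files"),
   ("BEHAVIOUR.", "behavioural runtime issue"),
   ("SYNTAX", "syntax issue"),
   ("BROWSER.", "browser runtime issue"),
   ("CONSISTENCY.", "consistency issue")]

-- ===== PORT A =====
-- inner 'for f in findings' loop: two ifs in A's order, return label on a hit
def pvAInner (pr label : String) : List (List (String × String)) → Option String
  | [] => none
  | f :: rest =>
    if (PySem.Dict.mk f).get? "finding_category" == some "missing" && pr == "missing" then some label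
    else if PySem.Str.isIn pr ((PySem.Dict.mk f).getD "id" "") then some label
    else pvAInner pr label rest

-- outer 'for prefix, label in priorities' loop
def pvAOuter (fs : List (List (String × String))) : List (String × String) → Option String
  | [] => none
  | (pr, label) :: ps =>
    match pvAInner pr label fs with
    | some l => some l
    | none => pvAOuter fs ps

def primary_reason_py (rec : List (String × List (List (String × String)))) : String :=
  let findings := (PySem.Dict.mk rec).getD "findings" []   -- rec.get("findings", []) or [] (or [] is a no-op on lists)
  (pvAOuter findings pvPriorities).getD "other"

-- ===== PORT B =====
-- inner break-loop: first priority index ≥ i matching this finding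
def pvBRank (catMissing : Bool) (fid : String) : Nat → List (String × String) → Option Nat
  | _, [] => none
  | i, (pr, _) :: ps =>
    if (catMissing && pr == "missing") || PySem.Str.isIn pr fid then some i
    else pvBRank catMissing fid (i + 1) ps

def primary_reason_py_alt (rec : List (String × List (List (String × String)))) : String :=
  let findings := (PySem.Dict.mk rec).getD "findings" []
  let best := findings.foldl (fun best f =>
      let catMissing := (PySem.Dict.mk f).get? "finding_category" == some "missing"
      let fid := (PySem.Dict.mk f).getD "id" ""
      match pvBRank catMissing fid 0 pvPriorities with
      | none => best
      | some i =>
        match best with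
        | none => some i
        | some b => if i < b then some i else some b) (none : Option Nat)
  match best with
  | none => "other"
  | some b =>
    match PySem.List.pyGet? pvPriorities (b : Int) with
    | some p => p.2
    | none => "other"   -- unreachable: b is always a valid index

-- ===== PRECONDITION & SPEC =====
def Spec_primary_reason_py (rec : List (String × List (List (String × String)))) (out : String) : Prop := out = primary_reason_py_alt rec
instance (rec : List (String × List (List (String × String)))) (out : String) : Decidable (Spec_primary_reason_py rec out) := by unfold Spec_primary_reason_py; infer_instance

-- ===== CLAIM (what is proved, stated in full; the proofs are below) =====
def Claim_equal_primary_reason_py : Prop := ∀ (rec : List (String × List (List (String × String)))), Dom_primary_reason_py rec → Spec_primary_reason_py rec (primary_reason_py rec)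

-- ===== LEMMAS AND PROOFS =====

-- combined match condition of one finding against one prefix
def pvMatch (f : List (String × String)) (pr : String) : Bool :=
  ((PySem.Dict.mk f).get? "finding_category" == some "missing" && pr == "missing")
  || PySem.Str.isIn pr ((PySem.Dict.mk f).getD "id" "")

-- local (0-based) index of the first prefix in P matched by some finding of fs
def pvFirst (fs : List (List (String × String))) : List (String × String) → Option Nat
  | [] => none
  | (pr, _) :: ps =>
    if fs.any (fun f => pvMatch f pr) then some 0 else (pvFirst fs ps).map (· + 1)

def pvOptMin : Option Nat → Option Nat → Option Nat
  | b, none => b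
  | none, some i => some i
  | some b, some i => if i < b then some i else some b

theorem pvOptMin_some_some (b i : Nat) : pvOptMin (some b) (some i) = some (min i b) := by
  by_cases h : i < b
  · simp [pvOptMin, h, Nat.min_eq_left (Nat.le_of_lt h)]
  · simp [pvOptMin, h, Nat.min_eq_right (Nat.le_of_not_lt h)]

theorem pvOptMin_none_left (a : Option Nat) : pvOptMin none a = a := by
  cases a <;> rfl

theorem pvOptMin_none_right (a : Option Nat) : pvOptMin a none = a := by
  cases a <;> rfl

theorem pvOptMin_assoc (a b c : Option Nat) :
    pvOptMin (pvOptMin a b) c = pvOptMin a (pvOptMin b c) := by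
  cases a <;> cases b <;> cases c <;>
    simp only [pvOptMin_some_some, pvOptMin_none_left, pvOptMin_none_right] <;>
    simp only [pvOptMin_some_some, Option.some.injEq] <;> omega

theorem pvOptMin_map_succ (a b : Option Nat) :
    pvOptMin (a.map (· + 1)) (b.map (· + 1)) = (pvOptMin a b).map (· + 1) := by
  cases a <;> cases b <;>
    simp only [Option.map_some, Option.map_none, pvOptMin_some_some,
      pvOptMin_none_left, pvOptMin_none_right, Option.some.injEq] <;> omega

theorem pvAInner_eq (pr label : String) (fs : List (List (String × String))) :
    pvAInner pr label fs = if fs.any (fun f => pvMatch f pr) then some label else none := by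
  induction fs with
  | nil => simp [pvAInner]
  | cons f rest ih =>
    simp only [pvAInner, List.any_cons, pvMatch, ih, Bool.or_eq_true, Bool.and_eq_true]
    split_ifs <;> first | rfl | tauto

theorem pvAOuter_eq (P : List (String × String)) (fs : List (List (String × String))) :
    pvAOuter fs P = (pvFirst fs P).bind (fun i => P[i]?.map Prod.snd) := by
  induction P with
  | nil => rfl
  | cons p ps ih =>
    obtain ⟨pr, label⟩ := p
    simp only [pvAOuter, pvFirst, pvAInner_eq, ih]
    split_ifs with h
    · simp
    · cases pvFirst fs ps <;> simp

theorem pvBRank_eq (f : List (String × String)) (P : List (String × String)) (k : Nat) :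
    pvBRank ((PySem.Dict.mk f).get? "finding_category" == some "missing")
            ((PySem.Dict.mk f).getD "id" "") k P = (pvFirst [f] P).map (k + ·) := by
  induction P generalizing k with
  | nil => rfl
  | cons p ps ih =>
    obtain ⟨pr, label⟩ := p
    simp only [pvBRank, pvFirst, List.any_cons, List.any_nil, Bool.or_false, pvMatch]
    split_ifs with h
    · simp
    · rw [ih]
      cases pvFirst [f] ps <;> simp <;> omega

theorem pvFirst_nil (P : List (String × String)) : pvFirst [] P = none := by
  induction P with
  | nil => rfl
  | cons p ps ih =>
    obtain ⟨pr, label⟩ := p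
    simp [pvFirst, ih]

theorem pvFirst_cons (P : List (String × String)) (f : List (String × String))
    (fs : List (List (String × String))) :
    pvFirst (f :: fs) P = pvOptMin (pvFirst [f] P) (pvFirst fs P) := by
  induction P with
  | nil => rfl
  | cons p ps ih =>
    obtain ⟨pr, label⟩ := p
    simp only [pvFirst, List.any_cons, List.any_nil, Bool.or_false]
    by_cases h1 : pvMatch f pr = true <;> by_cases h2 : (fs.any fun f => pvMatch f pr) = true
    · simp [h1, h2, pvOptMin]
    · simp only [h1, h2, Bool.true_or, if_true, Bool.false_eq_true, if_false]
      cases h : pvFirst fs ps <;> simp [pvOptMin]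
    · simp only [h1, h2, Bool.false_or, Bool.false_eq_true, if_false, if_true]
      cases h : pvFirst [f] ps <;> simp [pvOptMin]
    · simp only [h1, h2, Bool.or_self, Bool.false_eq_true, if_false, ih]
      exact (pvOptMin_map_succ _ _).symm

theorem pvFold_eq (P : List (String × String)) (fs : List (List (String × String)))
    (acc : Option Nat) :
    fs.foldl (fun best f =>
      let catMissing := (PySem.Dict.mk f).get? "finding_category" == some "missing"
      let fid := (PySem.Dict.mk f).getD "id" ""
      match pvBRank catMissing fid 0 P with
      | none => best
      | some i =>
        match best with
        | none => some i
        | some b => if i < b then some i else some b) acc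
    = pvOptMin acc (pvFirst fs P) := by
  induction fs generalizing acc with
  | nil => rw [List.foldl_nil, pvFirst_nil, pvOptMin_none_right]
  | cons f fs ih =>
    rw [List.foldl_cons, ih, pvFirst_cons, ← pvOptMin_assoc]
    congr 1
    show (match pvBRank ((PySem.Dict.mk f).get? "finding_category" == some "missing")
          ((PySem.Dict.mk f).getD "id" "") 0 P with
      | none => acc
      | some i =>
        match acc with
        | none => some i
        | some b => if i < b then some i else some b) = pvOptMin acc (pvFirst [f] P)
    rw [pvBRank_eq]
    cases pvFirst [f] P <;> cases acc <;> simp [pvOptMin]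

theorem pvFirst_lt (P : List (String × String)) (fs : List (List (String × String)))
    (i : Nat) (h : pvFirst fs P = some i) : i < P.length := by
  induction P generalizing i with
  | nil => simp [pvFirst] at h
  | cons p ps ih =>
    obtain ⟨pr, label⟩ := p
    simp only [pvFirst] at h
    split at h
    · simp only [Option.some.injEq] at h
      simp [← h]
    · simp only [Option.map_eq_some_iff] at h
      obtain ⟨j, hj, rfl⟩ := h
      have := ih j hj
      simp only [List.length_cons]
      omega

-- ===== VERDICT (by name: the statement is the Claim_ definition above) =====
theorem primary_reason_py_spec : Claim_equal_primary_reason_py := by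
  intro rec _
  unfold Spec_primary_reason_py primary_reason_py primary_reason_py_alt
  simp only [pvFold_eq, pvAOuter_eq, pvOptMin_none_left]
  set fs := (PySem.Dict.mk rec).getD "findings" [] with hfs
  cases h : pvFirst fs pvPriorities with
  | none => rfl
  | some i =>
    have hi := pvFirst_lt _ _ _ h
    simp only [pvPriorities, List.length] at hi
    interval_cases i <;> rfl
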